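-- pv_equiv track=rewrite | github.com/ep-eaglepoint-ai/bd_datasets_003 | wsi1tk-minimum-slot-schedule/repository_after/solution.py | _calculate_minimum_slots_from_counts
-- ===== SOURCE A (Python) =====
-- from typing import Dict, Iterable, List, Tuple, Union
--
-- def _calculate_minimum_slots_from_counts(counts: Dict[Union[str, int], int], n: int) -> int:
--     """
--     Same as `calculate_minimum_slots`, but takes a frequency map directly (avoids expanding lists).
--     """
--     total = sum(c for c in counts.values() if c > 0)
--     if total == 0:
--         return 0
--     if n == 0:
--         return total
--
--     max_freq = max(counts.values())
--     num_max = sum(1 for c in counts.values() if c == max_freq)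
--     min_slots = (max_freq - 1) * (n + 1) + num_max
--     return max(total, min_slots)
-- ===== SOURCE B (Python) =====
-- def _calculate_minimum_slots_from_counts(counts, n):
--     # Idle-slot accounting: the most frequent task pins down (m-1)*n idle gaps
--     # between its occurrences; every other task occurrence fills up to
--     # min(c, m-1) of those gaps. The schedule length is the number of task
--     # occurrences plus whatever idle gaps remain unfilled.
--     pos = [c for c in counts.values() if c > 0]
--     if not pos:
--         return 0
--     m = max(pos)
--     total = 0
--     idle = (m - 1) * n
--     seen_max = False
--     for c in pos:
--         total += c
--         if c == m and not seen_max: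
--             seen_max = True
--         else:
--             idle -= min(c, m - 1)
--     return total + idle if idle > 0 else total
-- ===== Notes on version B (the rewrite author's own statement) =====
-- stated objective: alternative
-- what changed: Replaces A's closed-form lower-bound formula (count the ties of the max and return max(total, (max-1)*(n+1)+num_max)) by the idle-slot accounting algorithm: start with (max-1)*n idle gaps pinned down by the most frequent task, subtract min(c, max-1) for every other task occurrence in a single fold, and return total plus the remaining positive idle; the n==0 special case and the tie count disappear.
import Mathlib
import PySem

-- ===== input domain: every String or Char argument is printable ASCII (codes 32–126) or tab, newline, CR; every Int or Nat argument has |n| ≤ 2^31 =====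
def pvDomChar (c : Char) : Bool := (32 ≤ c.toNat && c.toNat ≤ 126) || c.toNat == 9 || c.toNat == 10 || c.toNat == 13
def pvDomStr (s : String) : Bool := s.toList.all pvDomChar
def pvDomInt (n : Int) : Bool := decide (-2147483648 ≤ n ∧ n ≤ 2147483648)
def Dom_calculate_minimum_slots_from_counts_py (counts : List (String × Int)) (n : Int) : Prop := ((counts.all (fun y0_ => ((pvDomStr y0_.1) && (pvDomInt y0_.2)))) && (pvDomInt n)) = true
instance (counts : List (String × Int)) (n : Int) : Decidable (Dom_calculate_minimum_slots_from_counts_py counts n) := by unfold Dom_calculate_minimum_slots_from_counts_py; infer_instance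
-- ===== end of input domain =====

-- B replaces A's closed-form lower-bound formula (max(total, (max-1)*(n+1)+ties)) by the
-- idle-slot accounting algorithm: start with (m-1)*n idle gaps and let every other task
-- fill min(c, m-1) of them in one fold; alternative decomposition, not claimed faster.


-- ===== PORT A =====
def calculate_minimum_slots_from_counts_py (counts : List (String × Int)) (n : Int) : Int :=
  let vals := (PySem.Dict.ofList counts).values
  -- total = sum(c for c in counts.values() if c > 0)
  let total := (vals.filter (fun c => decide (0 < c))).sum
  if total = 0 then 0
  else if n = 0 then total
  else
    match PySem.List.max? vals (fun x => x) with
    | none => 0  -- unreachable: total ≠ 0 forces vals ≠ [], where Python's max() returns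
    | some max_freq =>
      -- num_max = sum(1 for c in counts.values() if c == max_freq)   (a 0/1-sum is countP)
      let num_max : Int := (vals.countP (fun c => c == max_freq) : Int)
      let min_slots := (max_freq - 1) * (n + 1) + num_max
      max total min_slots

-- ===== PORT B =====
def calculate_minimum_slots_from_counts_py_alt (counts : List (String × Int)) (n : Int) : Int :=
  let pos := ((PySem.Dict.ofList counts).values).filter (fun c => decide (0 < c))
  if pos = [] then 0
  else
    match PySem.List.max? pos (fun x => x) with
    | none => 0  -- unreachable: pos ≠ [], where Python's max() returns
    | some m =>
      -- for c in pos: total += c; fill an idle gap unless c is the (first) max itself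
      let st := pos.foldl
        (fun (st : Int × Int × Bool) c =>
          if c == m && !st.2.2 then (st.1 + c, st.2.1, true)
          else (st.1 + c, st.2.1 - min c (m - 1), st.2.2))
        (0, (m - 1) * n, false)
      if st.2.1 > 0 then st.1 + st.2.1 else st.1

-- ===== PRECONDITION & SPEC =====
def Spec_calculate_minimum_slots_from_counts_py (counts : List (String × Int)) (n : Int) (out : Int) : Prop := out = calculate_minimum_slots_from_counts_py_alt counts n
instance (counts : List (String × Int)) (n : Int) (out : Int) : Decidable (Spec_calculate_minimum_slots_from_counts_py counts n out) := by unfold Spec_calculate_minimum_slots_from_counts_py; infer_instance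

-- ===== CLAIM (what is proved, stated in full; the proofs are below) =====
def Claim_equal_calculate_minimum_slots_from_counts_py : Prop := ∀ (counts : List (String × Int)) (n : Int), Dom_calculate_minimum_slots_from_counts_py counts n → Spec_calculate_minimum_slots_from_counts_py counts n (calculate_minimum_slots_from_counts_py counts n)

-- ===== LEMMAS AND PROOFS =====

-- every element of the positive filter is positive, so a nonempty filter has positive sum
lemma pv_filter_pos_sum_pos (vals : List Int)
    (h : vals.filter (fun c => decide (0 < c)) ≠ []) :
    0 < (vals.filter (fun c => decide (0 < c))).sum := by
  apply List.sum_pos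
  · intro a ha
    have := List.of_mem_filter ha
    simpa using this
  · exact h

-- the max of the positive filter equals Python's max over ALL values (when the filter is nonempty)
lemma pv_max_eq (vals : List Int) (m : Int)
    (hs : PySem.List.max? (vals.filter (fun c => decide (0 < c))) (fun x => x) = some m) :
    PySem.List.max? vals (fun x => x) = some m := by
  have hm_mem_f : m ∈ vals.filter (fun c => decide (0 < c)) := PySem.List.max?_mem hs
  have hm_pos : 0 < m := by simpa using List.of_mem_filter hm_mem_f
  have hm_mem : m ∈ vals := List.mem_of_mem_filter hm_mem_f
  have hge : ∀ y ∈ vals.filter (fun c => decide (0 < c)), y ≤ m := by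
    have := PySem.List.max?_isMax hs
    simpa using this
  have hne : vals ≠ [] := by
    intro h; subst h; simp at hm_mem
  obtain ⟨mx, hmx⟩ : ∃ mx, PySem.List.max? vals (fun x => x) = some mx := by
    cases hmax : PySem.List.max? vals (fun x => x) with
    | none => exact absurd ((PySem.List.max?_eq_none_iff _ _).1 hmax) hne
    | some mx => exact ⟨mx, rfl⟩
  have hmx_mem : mx ∈ vals := PySem.List.max?_mem hmx
  have hmx_max : ∀ y ∈ vals, y ≤ mx := by
    have := PySem.List.max?_isMax hmx
    simpa using this
  have h1 : m ≤ mx := hmx_max m hm_mem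
  have h2 : mx ≤ m := by
    by_cases hp : 0 < mx
    · exact hge mx (List.mem_filter.2 ⟨hmx_mem, by simpa using hp⟩)
    · omega
  rw [hmx, le_antisymm h2 h1]

-- counting the max among all values = counting it among the positive ones (the max is positive)
lemma pv_count_filter (vals : List Int) (m : Int) (hm : 0 < m) :
    (vals.filter (fun c => decide (0 < c))).count m = vals.countP (fun c => c == m) := by
  rw [List.count, List.countP_filter]
  apply List.countP_congr
  intro a _
  by_cases h : a = m
  · subst h; simp [hm]
  · simp [h]

-- B's fold once the max has been seen: total accumulates the sum, idle loses min c (m-1) each step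
lemma pv_fold_seen (m : Int) (pos : List Int) (t0 i0 : Int) :
    pos.foldl
      (fun (st : Int × Int × Bool) c =>
        if c == m && !st.2.2 then (st.1 + c, st.2.1, true)
        else (st.1 + c, st.2.1 - min c (m - 1), st.2.2))
      (t0, i0, true)
    = (t0 + pos.sum, i0 - (pos.map (fun c => min c (m - 1))).sum, true) := by
  induction pos generalizing t0 i0 with
  | nil => simp
  | cons c rest ih =>
    simp only [List.foldl_cons, List.map_cons, List.sum_cons]
    rw [if_neg (by simp), ih]
    simp only [Prod.mk.injEq]
    refine ⟨by ring, by ring, trivial⟩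

-- B's fold before the max is seen (m ∈ pos): exactly one occurrence of m is exempted,
-- and min m (m-1) = m-1 is credited back
lemma pv_fold_unseen (m : Int) (pos : List Int) (t0 i0 : Int) (hm : m ∈ pos) :
    pos.foldl
      (fun (st : Int × Int × Bool) c =>
        if c == m && !st.2.2 then (st.1 + c, st.2.1, true)
        else (st.1 + c, st.2.1 - min c (m - 1), st.2.2))
      (t0, i0, false)
    = (t0 + pos.sum, i0 - (pos.map (fun c => min c (m - 1))).sum + (m - 1), true) := by
  induction pos generalizing t0 i0 with
  | nil => simp at hm
  | cons c rest ih =>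
    simp only [List.foldl_cons, List.map_cons, List.sum_cons]
    by_cases hc : c = m
    · subst hc
      rw [if_pos (by simp), pv_fold_seen]
      have : min c (c - 1) = c - 1 := by omega
      simp only [Prod.mk.injEq]
      refine ⟨by ring, by omega, trivial⟩
    · have hm' : m ∈ rest := by
        rcases List.mem_cons.1 hm with h | h
        · exact absurd h.symm hc
        · exact h
      rw [if_neg (by simp [hc]), ih _ _ hm']
      simp only [Prod.mk.injEq]
      refine ⟨by ring, by ring, trivial⟩

-- on a list of positives bounded by m, the filled-gap sum is total - (count of m)
lemma pv_min_sum (m : Int) (pos : List Int)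
    (hpos : ∀ c ∈ pos, 0 < c) (hle : ∀ c ∈ pos, c ≤ m) :
    (pos.map (fun c => min c (m - 1))).sum = pos.sum - (pos.count m : Int) := by
  induction pos with
  | nil => simp
  | cons c rest ih =>
    have hc := hpos c List.mem_cons_self
    have hcm := hle c List.mem_cons_self
    have ih' := ih (fun x hx => hpos x (List.mem_cons_of_mem _ hx))
                   (fun x hx => hle x (List.mem_cons_of_mem _ hx))
    simp only [List.map_cons, List.sum_cons, List.count_cons, ih']
    by_cases h : c = m
    · subst h
      have hmin : min c (c - 1) = c - 1 := by omega
      simp only [hmin, beq_self_eq_true, if_true]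
      push_cast
      ring
    · have hb : (c == m) = false := by simpa using h
      simp only [hb]
      push_cast
      omega

-- the total of the positives is at least m - 1 + count of m (used for A's n = 0 branch)
lemma pv_total_ge (m : Int) (pos : List Int)
    (hpos : ∀ c ∈ pos, 0 < c) (hle : ∀ c ∈ pos, c ≤ m) (hm : m ∈ pos) :
    m - 1 + (pos.count m : Int) ≤ pos.sum := by
  have hmin : (pos.map (fun c => min c (m - 1))).sum = pos.sum - (pos.count m : Int) :=
    pv_min_sum m pos hpos hle
  have hnn : ∀ x ∈ pos.map (fun c => min c (m - 1)), (0 : Int) ≤ x := by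
    intro x hx
    obtain ⟨c, hc, rfl⟩ := List.mem_map.1 hx
    have h1 := hpos c hc
    have h2 := hle c hc
    have hmp : 0 < m := lt_of_lt_of_le h1 h2
    omega
  have hmem : (min m (m - 1)) ∈ pos.map (fun c => min c (m - 1)) := List.mem_map_of_mem hm
  have h1 : min m (m - 1) ≤ (pos.map (fun c => min c (m - 1))).sum :=
    List.single_le_sum hnn _ hmem
  have hmp : 0 < m := hpos m hm
  have : min m (m - 1) = m - 1 := by omega
  omega

theorem calculate_minimum_slots_from_counts_py_spec : Claim_equal_calculate_minimum_slots_from_counts_py := by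
  intro counts n _
  unfold Spec_calculate_minimum_slots_from_counts_py
  unfold calculate_minimum_slots_from_counts_py calculate_minimum_slots_from_counts_py_alt
  dsimp only
  set vals := (PySem.Dict.ofList counts).values with hvals
  set pos := vals.filter (fun c => decide (0 < c)) with hpos_def
  by_cases hnil : pos = []
  · simp [hnil]
  · rw [if_neg hnil]
    obtain ⟨m, hmax⟩ : ∃ m, PySem.List.max? pos (fun x => x) = some m := by
      cases h : PySem.List.max? pos (fun x => x) with
      | none => exact absurd ((PySem.List.max?_eq_none_iff _ _).1 h) hnil
      | some m => exact ⟨m, rfl⟩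
    rw [hmax]
    dsimp only
    have hm_mem : m ∈ pos := PySem.List.max?_mem hmax
    have hall_pos : ∀ c ∈ pos, 0 < c := by
      intro c hc
      have := List.of_mem_filter hc
      simpa using this
    have hall_le : ∀ c ∈ pos, c ≤ m := by
      have := PySem.List.max?_isMax hmax
      simpa using this
    have hm_pos : 0 < m := hall_pos m hm_mem
    have htot_pos : 0 < pos.sum := pv_filter_pos_sum_pos vals hnil
    have hk_pos : (0 : Int) < (pos.count m : Int) := by
      have := List.count_pos_iff.2 hm_mem
      exact_mod_cast this
    rw [pv_fold_unseen m pos 0 ((m - 1) * n) hm_mem,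
        pv_min_sum m pos hall_pos hall_le]
    dsimp only
    rw [if_neg (by omega : ¬ pos.sum = 0), pv_max_eq vals m hmax]
    dsimp only
    have hcnt : ((vals.countP (fun c => c == m)) : Int) = (pos.count m : Int) := by
      rw [← pv_count_filter vals m hm_pos]
    by_cases hn : n = 0
    · subst hn
      rw [if_pos rfl]
      have hge := pv_total_ge m pos hall_pos hall_le hm_mem
      rw [if_neg (by omega)]
      omega
    · rw [if_neg hn]
      rw [hcnt]
      by_cases h : (m - 1) * n - (pos.sum - (pos.count m : Int)) + (m - 1) > 0
      · rw [if_pos h]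
        have hmax2 : max pos.sum ((m - 1) * (n + 1) + (pos.count m : Int))
            = (m - 1) * (n + 1) + (pos.count m : Int) := by
          apply max_eq_right
          nlinarith [h]
        rw [hmax2]; ring
      · rw [if_neg h]
        have hle2 : (m - 1) * (n + 1) + (pos.count m : Int) ≤ pos.sum := by
          nlinarith [not_lt.mp h]
        rw [max_eq_left hle2]; ring
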